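-- pv_equiv track=rewrite | github.com/cthacker-udel/ProgrammingProblems | pythonProblems/5kyu/roboscript/roboscript.py | execute
-- ===== SOURCE A (Python) =====
-- from enum import Enum
--
-- class Direction(Enum):
--     NORTH = 1
--     EAST = 2
--     SOUTH = 3
--     WEST = 4
--
-- directions = {
--     Direction.EAST: [Direction.SOUTH, Direction.NORTH],
--     Direction.SOUTH: [Direction.WEST, Direction.EAST],
--     Direction.NORTH: [Direction.EAST, Direction.WEST],
--     Direction.WEST: [Direction.NORTH, Direction.SOUTH]
-- }
--
-- def execute(code: str) -> str:
--     grid = [['*']]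
--     x = 0
--     y = 0
--     _dir = Direction.EAST
--     pending_command = {}
--     ind_ = 0
--     max_width = 1
--     while ind_ < len(code):
--         each_command = code[ind_] if not pending_command else pending_command['cmd']
--         if pending_command:
--             if pending_command['left'] == 0:
--                 ind_ = pending_command['end'] if pending_command['end'] != - \
--                     1 else len(code) - 1
--                 pending_command = {}
--                 continue
--             pending_command['left'] -= 1
--         if not pending_command and ind_ < len(code) - 1 and code[ind_ + 1].isdigit():
--             ## process amt of commands
--             command_amt = ''
--             ending_digit = -1
--             for k in range(ind_ + 1, len(code)):
--                 if not code[k].isdigit():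
--                     ending_digit = k
--                     break
--                 command_amt += code[k]
--             pending_command = {'cmd': each_command, 'amt': int(
--                 command_amt), 'left': int(command_amt), 'end': ending_digit}
--         elif each_command == 'F':
--             if _dir == Direction.SOUTH:
--                 ## check if we are in bounds
--                 if len(grid) <= (y + 1):
--                     ## add row
--                     grid.append([''] * (max_width))
--                 y += 1
--                 grid[y][x] = '*'
--             elif _dir == Direction.EAST:
--                 # check if we are in bounds
--                 if len(grid[y]) <= (x + 1):
--                     ## add cell to grid
--                     for each_sub_grid in grid:
--                         each_sub_grid.append('')
--                         max_width = max(max_width, len(each_sub_grid))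
--                 x += 1
--                 grid[y][x] = '*'
--             elif _dir == Direction.NORTH:
--                 ## check if we are at the end
--                 if y == 0:
--                     # insert new row at the top of the grid
--                     grid.insert(0, [''] * (max_width))
--                 y -= 1 if y != 0 else 0
--                 grid[y][x] = '*'
--             elif _dir == Direction.WEST:
--                 ## check if we are at the edge
--                 if x == 0:
--                     for each_sub_grid in grid:
--                         each_sub_grid.insert(0, '')
--                         max_width = max(max_width, len(each_sub_grid))
--                 x -= 1 if x != 0 else 0
--                 grid[y][x] = '*'
--         elif each_command == 'L':
--             _dir = directions[_dir][1]
--         elif each_command == 'R':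
--             _dir = directions[_dir][0]
--         ind_ += 1 if not pending_command else 0
--     for i in range(len(grid)):
--         each_sub_grid = grid[i]
--         stringified_sub_grid = ''
--         for each_char in each_sub_grid:
--             if each_char == '*':
--                 stringified_sub_grid += "*"
--             else:
--                 stringified_sub_grid += " "
--         grid[i] = stringified_sub_grid
--     stringified_grid = '\r\n'.join(grid)
--     return stringified_grid
-- ===== SOURCE B (Python) =====
-- def execute(code: str) -> str:
--     # one pass over the tokens: visited-cell set + running bounds, grid rendered once at the end
--     deltas = ((1, 0), (0, 1), (-1, 0), (0, -1))  # EAST, SOUTH, WEST, NORTH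
--     x = y = d = 0
--     minx = maxx = miny = maxy = 0
--     visited = {(0, 0)}
--     i, n = 0, len(code)
--     while i < n:
--         c = code[i]
--         j = i + 1
--         while j < n and code[j].isdigit():
--             j += 1
--         cnt = int(code[i + 1:j]) if j > i + 1 else 1
--         if c == 'F':
--             dx, dy = deltas[d]
--             for _ in range(cnt):
--                 x += dx
--                 y += dy
--                 visited.add((x, y))
--                 minx = min(minx, x)
--                 maxx = max(maxx, x)
--                 miny = min(miny, y)
--                 maxy = max(maxy, y)
--         elif c == 'L':
--             d = (d - cnt) % 4
--         elif c == 'R':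
--             d = (d + cnt) % 4
--         i = j
--     return '\r\n'.join(
--         ''.join('*' if (xx, yy) in visited else ' ' for xx in range(minx, maxx + 1))
--         for yy in range(miny, maxy + 1))
-- ===== Notes on version B (the rewrite author's own statement) =====
-- stated objective: faster
-- what changed: Replaces the pending-command dict and the mutable growing 2-D grid (per-move row/column insertion and copying) with a single tokenising pass that simulates moves into a visited-cell set with running bounds, reduces repeated turns mod 4, and renders the grid once at the end.
import Mathlib
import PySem

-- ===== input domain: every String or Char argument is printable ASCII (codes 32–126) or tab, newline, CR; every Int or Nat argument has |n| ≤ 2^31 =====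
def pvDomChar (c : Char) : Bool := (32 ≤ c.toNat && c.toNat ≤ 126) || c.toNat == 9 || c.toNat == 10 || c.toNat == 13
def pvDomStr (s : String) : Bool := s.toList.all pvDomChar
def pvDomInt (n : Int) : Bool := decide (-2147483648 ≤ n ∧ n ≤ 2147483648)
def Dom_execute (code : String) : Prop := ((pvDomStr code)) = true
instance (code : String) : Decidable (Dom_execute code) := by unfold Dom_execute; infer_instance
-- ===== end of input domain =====

-- B replaces A's pending-command dict and mutable growing 2-D grid with one tokenising pass
-- into a visited-cell set with running bounds (turn repeats reduced mod 4), rendering once at the end.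

-- ===== PORT A =====

-- the Direction enum
inductive PyDirection | north | east | south | west
deriving DecidableEq, Repr

-- directions[d][0] (taken on 'R') and directions[d][1] (taken on 'L')
def dirR : PyDirection → PyDirection
  | .east => .south | .south => .west | .north => .east | .west => .north
def dirL : PyDirection → PyDirection
  | .east => .north | .south => .east | .north => .west | .west => .south

-- pending_command dict {cmd, amt, left, end}; the empty dict is none; Python's -1 'end' sentinel is none
structure APending where
  cmd : Char
  amt : Nat
  left : Nat
  end? : Option Nat
deriving DecidableEq, Repr

-- the loop's mutable drawing variables grid / x / y / _dir / max_width
-- (grid cells are the Python strings '' and '*', kept as List Char)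
structure AMove where
  grid : List (List (List Char))
  x : Nat
  y : Nat
  dir : PyDirection
  maxWidth : Nat
deriving Repr

-- int(s): exact port of int() on the nonempty ASCII digit strings that are the only arguments here
def pyIntOfDigits (s : List Char) : Nat := s.foldl (fun a c => a * 10 + (c.toNat - 48)) 0

-- the inner 'for k in range(ind_+1, len(code))' digit scan: returns (command_amt, ending_digit)
def scanDigits (cs : List Char) (k : Nat) : List Char × Option Nat :=
  if h : k < cs.length then
    if PySem.Chars.isdigit cs[k] then
      let r := scanDigits cs (k + 1)
      (cs[k] :: r.1, r.2)
    else ([], some k)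
  else ([], none)
termination_by cs.length - k

-- grid[y][x] = '*'
def setCell (g : List (List (List Char))) (y x : Nat) : List (List (List Char)) :=
  g.modify y (fun row => row.set x ['*'])

-- the elif chain executing one command character on the drawing state
def aExec (c : Char) (st : AMove) : AMove :=
  if c = 'F' then
    match st.dir with
    | .south =>
        let st1 := if st.grid.length ≤ st.y + 1 then
            { st with grid := st.grid ++ [List.replicate st.maxWidth ([] : List Char)] } else st
        { st1 with y := st1.y + 1, grid := setCell st1.grid (st1.y + 1) st1.x }
    | .east =>
        let st1 := if (st.grid.getD st.y []).length ≤ st.x + 1 then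
            let p := st.grid.foldl (fun (acc : List (List (List Char)) × Nat) row =>
              let row' := row ++ [([] : List Char)]
              (acc.1 ++ [row'], max acc.2 row'.length)) ([], st.maxWidth)
            { st with grid := p.1, maxWidth := p.2 } else st
        { st1 with x := st1.x + 1, grid := setCell st1.grid st1.y (st1.x + 1) }
    | .north =>
        let st1 := if st.y = 0 then
            { st with grid := List.replicate st.maxWidth ([] : List Char) :: st.grid } else st
        let y' := if st1.y ≠ 0 then st1.y - 1 else st1.y
        { st1 with y := y', grid := setCell st1.grid y' st1.x }
    | .west =>
        let st1 := if st.x = 0 then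
            let p := st.grid.foldl (fun (acc : List (List (List Char)) × Nat) row =>
              let row' := ([] : List Char) :: row
              (acc.1 ++ [row'], max acc.2 row'.length)) ([], st.maxWidth)
            { st with grid := p.1, maxWidth := p.2 } else st
        let x' := if st1.x ≠ 0 then st1.x - 1 else st1.x
        { st1 with x := x', grid := setCell st1.grid st1.y x' }
  else if c = 'L' then { st with dir := dirL st.dir }
  else if c = 'R' then { st with dir := dirR st.dir }
  else st

-- the while loop over (drawing state, pending_command, ind_);
-- the fuel argument only makes the recursion structural (it is chosen large enough in execute)
def aLoop (cs : List Char) : Nat → AMove → Option APending → Nat → AMove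
  | 0, st, _, _ => st
  | fuel + 1, st, pending, ind =>
    if ind < cs.length then
      match pending with
      | some p =>
        if p.left = 0 then
          aLoop cs fuel st none (p.end?.getD (cs.length - 1))
        else
          aLoop cs fuel (aExec p.cmd st) (some { p with left := p.left - 1 }) ind
      | none =>
        if (ind < cs.length - 1) ∧ (PySem.Chars.isdigit (cs.getD (ind + 1) ' ') = true) then
          let r := scanDigits cs (ind + 1)
          let amt := pyIntOfDigits r.1
          aLoop cs fuel st (some ⟨cs.getD ind ' ', amt, amt, r.2⟩) ind
        else
          aLoop cs fuel (aExec (cs.getD ind ' ') st) none (ind + 1)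
    else st

-- stringify one row ('*' stays, anything else prints ' ')
def renderRow (row : List (List Char)) : List Char :=
  row.foldl (fun acc cell => acc ++ (if cell = ['*'] then ['*'] else [' '])) []

def execute (code : String) : String :=
  let cs := code.toList
  let fin := aLoop cs ((cs.length + 1) * (10 ^ cs.length + 4))
      { grid := [[['*']]], x := 0, y := 0, dir := .east, maxWidth := 1 } none 0
  String.ofList (PySem.Chars.join ['\r', '\n'] (fin.grid.map renderRow))

-- ===== PORT B =====

-- the simulation state: position, heading index, running bounds, visited-cell set
structure BState where
  x : Int
  y : Int
  d : Int
  minx : Int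
  maxx : Int
  miny : Int
  maxy : Int
  vis : PySem.Set (Int × Int)
deriving Repr

-- deltas[d] for d in [0,4): EAST, SOUTH, WEST, NORTH
def bDelta (d : Int) : Int × Int :=
  PySem.List.pyGetD [((1:Int), (0:Int)), (0, 1), (-1, 0), (0, -1)] d (0, 0)

-- the inner 'while j < n and code[j].isdigit(): j += 1'
def bScan (cs : List Char) (j : Nat) : Nat :=
  if (j < cs.length) ∧ (PySem.Chars.isdigit (cs.getD j ' ') = true) then bScan cs (j + 1) else j
termination_by cs.length - j
decreasing_by omega

-- 'for _ in range(cnt): x += dx; y += dy; visited.add((x,y)); bounds updates'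
def bMoveN : Nat → Int × Int → BState → BState
  | 0, _, st => st
  | k + 1, dxy, st =>
    let nx := st.x + dxy.1
    let ny := st.y + dxy.2
    let st' : BState :=
      { x := nx, y := ny, d := st.d, vis := PySem.Set.add st.vis (nx, ny),
        minx := min st.minx nx, maxx := max st.maxx nx,
        miny := min st.miny ny, maxy := max st.maxy ny }
    bMoveN k dxy st'

theorem bScan_ge (cs : List Char) (j : Nat) : j ≤ bScan cs j := by
  fun_induction bScan cs j with
  | case1 j h ih => omega
  | case2 j h => omega

-- the token loop: one step per (command, repeat-count) token
def bLoop (cs : List Char) (i : Nat) (st : BState) : BState :=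
  if h : i < cs.length then
    let c := cs.getD i ' '
    let j := bScan cs (i + 1)
    let cnt := if i + 1 < j then
        pyIntOfDigits (PySem.List.slice cs (some (i + 1 : Nat)) (some (j : Nat))) else 1
    let st' :=
      if c = 'F' then bMoveN cnt (bDelta st.d) st
      else if c = 'L' then { st with d := PySem.Int.mod (st.d - cnt) 4 }
      else if c = 'R' then { st with d := PySem.Int.mod (st.d + cnt) 4 }
      else st
    bLoop cs j st'
  else st
termination_by cs.length - i
decreasing_by have := bScan_ge cs (i + 1); omega

def execute_alt (code : String) : String :=
  let cs := code.toList
  let fin := bLoop cs 0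
      { x := 0, y := 0, d := 0, minx := 0, maxx := 0, miny := 0, maxy := 0,
        vis := PySem.Set.ofList [((0:Int), (0:Int))] }
  String.ofList (PySem.Chars.join ['\r', '\n']
    ((PySem.List.pyRange fin.miny (fin.maxy + 1) 1).map (fun yy =>
      PySem.Chars.join []
        ((PySem.List.pyRange fin.minx (fin.maxx + 1) 1).map (fun xx =>
          if PySem.Set.contains fin.vis (xx, yy) then ['*'] else [' '])))))

-- ===== PRECONDITION & SPEC =====
def Spec_execute (code : String) (out : String) : Prop := out = execute_alt code
instance (code : String) (out : String) : Decidable (Spec_execute code out) := by unfold Spec_execute; infer_instance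

-- ===== CLAIM (what is proved, stated in full; the proofs are below) =====
def Claim_equal_execute : Prop := ∀ (code : String), Dom_execute code → Spec_execute code (execute code)

-- ===== LEMMAS AND PROOFS =====

-- heading index of a direction (B's encoding: EAST 0, SOUTH 1, WEST 2, NORTH 3)
def dirIdx : PyDirection → Int
  | .east => 0 | .south => 1 | .west => 2 | .north => 3

-- the grid is the indicator of the visited set, shifted by the bound offsets
def CellProp (g : List (List (List Char))) (w : Nat) (minx miny : Int)
    (vis : PySem.Set (Int × Int)) : Prop :=
  ∀ r c : Nat, r < g.length → c < w →
    (((g.getD r []).getD c []) = ['*'] ↔ (minx + c, miny + r) ∈ vis)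

-- the simulation invariant tying A's growing grid to B's visited set with bounds
structure SimInv (a : AMove) (b : BState) : Prop where
  hx : (a.x : Int) = b.x - b.minx
  hy : (a.y : Int) = b.y - b.miny
  hx1 : b.minx ≤ b.x
  hx2 : b.x ≤ b.maxx
  hy1 : b.miny ≤ b.y
  hy2 : b.y ≤ b.maxy
  hlen : (a.grid.length : Int) = b.maxy - b.miny + 1
  hw : (a.maxWidth : Int) = b.maxx - b.minx + 1
  hrows : ∀ row ∈ a.grid, row.length = a.maxWidth
  hcell : CellProp a.grid a.maxWidth b.minx b.miny b.vis
  hdir : dirIdx a.dir = b.d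
  hbound : ∀ p ∈ b.vis, b.minx ≤ p.1 ∧ p.1 ≤ b.maxx ∧ b.miny ≤ p.2 ∧ p.2 ≤ b.maxy

-- one iteration of B's F loop
def bStep (dxy : Int × Int) (st : BState) : BState :=
  { x := st.x + dxy.1, y := st.y + dxy.2, d := st.d,
    vis := PySem.Set.add st.vis (st.x + dxy.1, st.y + dxy.2),
    minx := min st.minx (st.x + dxy.1), maxx := max st.maxx (st.x + dxy.1),
    miny := min st.miny (st.y + dxy.2), maxy := max st.maxy (st.y + dxy.2) }

theorem bMoveN_succ (k : Nat) (dxy : Int × Int) (st : BState) :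
    bMoveN (k + 1) dxy st = bMoveN k dxy (bStep dxy st) := rfl

-- A's execution of k copies of command c
def aExecN (c : Char) : Nat → AMove → AMove
  | 0, st => st
  | k + 1, st => aExecN c k (aExec c st)

-- B's effect of one (command, count) token (the st' of bLoop)
def bTok (c : Char) (cnt : Nat) (st : BState) : BState :=
  if c = 'F' then bMoveN cnt (bDelta st.d) st
  else if c = 'L' then { st with d := PySem.Int.mod (st.d - cnt) 4 }
  else if c = 'R' then { st with d := PySem.Int.mod (st.d + cnt) 4 }
  else st

theorem length_setCell (g : List (List (List Char))) (y x : Nat) :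
    (setCell g y x).length = g.length := List.length_modify _ _ _

theorem rows_setCell (g : List (List (List Char))) (w y x : Nat)
    (hrows : ∀ r ∈ g, r.length = w) : ∀ r ∈ setCell g y x, r.length = w := by
  intro r hr
  unfold setCell at hr
  rw [List.mem_iff_getElem] at hr
  obtain ⟨i, hi, rfl⟩ := hr
  rw [List.getElem_modify]
  split
  · rw [List.length_set]
    exact hrows _ (List.getElem_mem _)
  · exact hrows _ (List.getElem_mem _)

theorem getD_replicate (w c : Nat) :
    (List.replicate w ([] : List Char)).getD c [] = [] := by
  rw [List.getD_eq_getElem?_getD, List.getElem?_replicate]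
  split <;> rfl

theorem getD_setCell (g : List (List (List Char))) (y x r c : Nat)
    (hy : y < g.length) (hx : x < (g.getD y []).length) :
    (((setCell g y x).getD r []).getD c []) =
      if r = y ∧ c = x then ['*'] else ((g.getD r []).getD c []) := by
  unfold setCell
  rw [List.getD_eq_getElem?_getD (l := (g.modify y fun row => row.set x ['*'])) (i := r),
    List.getElem?_modify]
  rw [List.getD_eq_getElem g [] hy] at hx
  cases hgr : g[r]? with
  | none =>
    have hrlen : g.length ≤ r := by rwa [List.getElem?_eq_none_iff] at hgr
    rw [if_neg (by rintro ⟨rfl, -⟩; omega)]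
    rw [List.getD_eq_getElem?_getD (l := g) (i := r), hgr]
    rfl
  | some row =>
    have hRHS : g.getD r [] = row := by
      rw [List.getD_eq_getElem?_getD (l := g) (i := r), hgr]; rfl
    rw [hRHS]
    simp only [Option.map_eq_map, Option.map_some, Option.getD_some]
    by_cases hyr : y = r
    · subst hyr
      rw [if_pos rfl]
      have hrowy : row = g[y] := by
        rw [← hRHS]; exact List.getD_eq_getElem g [] hy
      rw [List.getD_eq_getElem?_getD (l := row.set x ['*']) (i := c), List.getElem?_set]
      by_cases hxc : x = c
      · subst hxc
        have hxrow : x < row.length := by rw [hrowy]; exact hx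
        simp [hxrow]
      · rw [if_neg hxc, if_neg (by rintro ⟨-, rfl⟩; exact hxc rfl)]
        rw [← List.getD_eq_getElem?_getD]
    · rw [if_neg hyr, if_neg (by rintro ⟨rfl, -⟩; exact hyr rfl)]

theorem cellProp_mark (g : List (List (List Char))) (w : Nat) (minx miny : Int)
    (vis : PySem.Set (Int × Int)) (py px : Nat)
    (hc : CellProp g w minx miny vis) (hrows : ∀ r ∈ g, r.length = w)
    (hpy : py < g.length) (hpx : px < w) :
    CellProp (setCell g py px) w minx miny
      (PySem.Set.add vis (minx + px, miny + py)) := by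
  intro r c hr hcw
  rw [length_setCell] at hr
  rw [getD_setCell g py px r c hpy (by
    rw [List.getD_eq_getElem g [] hpy, hrows _ (List.getElem_mem _)]; exact hpx)]
  rw [PySem.Set.mem_add]
  constructor
  · intro hstar
    split at hstar
    · rename_i hrc
      right
      rw [hrc.1, hrc.2]
    · left
      exact (hc r c hr hcw).mp hstar
  · intro hmem
    rcases hmem with hmem | heq
    · split
      · rfl
      · exact (hc r c hr hcw).mpr hmem
    · have hrc : r = py ∧ c = px := by
        have h1 : (minx + (c : Int)) = minx + px := congrArg Prod.fst heq
        have h2 : (miny + (r : Int)) = miny + py := congrArg Prod.snd heq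
        omega
      rw [if_pos hrc]

theorem cellProp_append_row (g : List (List (List Char))) (w : Nat) (minx miny : Int)
    (vis : PySem.Set (Int × Int)) (hc : CellProp g w minx miny vis)
    (hno : ∀ c : Nat, (minx + c, miny + g.length) ∉ vis) :
    CellProp (g ++ [List.replicate w ([] : List Char)]) w minx miny vis := by
  intro r c hr hcw
  rw [List.length_append, List.length_singleton] at hr
  by_cases hrl : r < g.length
  · rw [List.getD_eq_getElem?_getD (l := g ++ _) (i := r),
      List.getElem?_append_left hrl, ← List.getD_eq_getElem?_getD]
    exact hc r c hrl hcw
  · have hre : r = g.length := by omega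
    subst hre
    rw [List.getD_eq_getElem?_getD (l := g ++ _) (i := g.length),
      List.getElem?_append_right (le_refl _), Nat.sub_self]
    simp only [List.getElem?_cons_zero, Option.getD_some, getD_replicate]
    constructor
    · intro hstar; simp at hstar
    · intro hmem
      exact absurd hmem (hno c)

theorem cellProp_cons_row (g : List (List (List Char))) (w : Nat) (minx miny : Int)
    (vis : PySem.Set (Int × Int)) (hc : CellProp g w minx miny vis)
    (hno : ∀ c : Nat, (minx + c, miny - 1) ∉ vis) :
    CellProp (List.replicate w ([] : List Char) :: g) w minx (miny - 1) vis := by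
  intro r c hr hcw
  cases r with
  | zero =>
    simp only [List.getD_cons_zero, getD_replicate]
    constructor
    · intro hstar; simp at hstar
    · intro hmem
      refine absurd ?_ (hno c)
      simpa using hmem
  | succ r' =>
    simp only [List.getD_cons_succ, List.length_cons] at hr ⊢
    rw [hc r' c (by omega) hcw]
    have harith : miny - 1 + ((r' : Int) + 1) = miny + r' := by omega
    push_cast
    rw [harith]

theorem cellProp_append_col (g : List (List (List Char))) (w : Nat) (minx miny : Int)
    (vis : PySem.Set (Int × Int)) (hc : CellProp g w minx miny vis)
    (hrows : ∀ r ∈ g, r.length = w)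
    (hno : ∀ r : Nat, (minx + w, miny + r) ∉ vis) :
    CellProp (g.map (· ++ [([] : List Char)])) (w + 1) minx miny vis := by
  intro r c hr hcw
  rw [List.length_map] at hr
  rw [List.getD_eq_getElem (g.map (· ++ [([] : List Char)])) [] (by simpa using hr),
    List.getElem_map]
  have hrl : g[r].length = w := hrows _ (List.getElem_mem _)
  by_cases hcl : c < w
  · rw [List.getD_eq_getElem?_getD (l := g[r] ++ _) (i := c),
      List.getElem?_append_left (by omega), ← List.getD_eq_getElem?_getD,
      ← List.getD_eq_getElem g [] hr]
    exact hc r c hr hcl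
  · have hce : c = w := by omega
    subst hce
    rw [List.getD_eq_getElem?_getD (l := g[r] ++ _) (i := c),
      List.getElem?_append_right (by omega), hrl, Nat.sub_self]
    simp only [List.getElem?_cons_zero, Option.getD_some]
    constructor
    · intro hstar; simp at hstar
    · intro hmem
      exact absurd hmem (hno r)

theorem cellProp_cons_col (g : List (List (List Char))) (w : Nat) (minx miny : Int)
    (vis : PySem.Set (Int × Int)) (hc : CellProp g w minx miny vis)
    (hno : ∀ r : Nat, (minx - 1, miny + r) ∉ vis) :
    CellProp (g.map (([] : List Char) :: ·)) (w + 1) (minx - 1) miny vis := by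
  intro r c hr hcw
  rw [List.length_map] at hr
  rw [List.getD_eq_getElem (g.map (([] : List Char) :: ·)) [] (by simpa using hr),
    List.getElem_map]
  cases c with
  | zero =>
    simp only [List.getD_cons_zero]
    constructor
    · intro hstar; simp at hstar
    · intro hmem
      refine absurd ?_ (hno r)
      simpa using hmem
  | succ c' =>
    simp only [List.getD_cons_succ]
    rw [← List.getD_eq_getElem g [] hr]
    rw [hc r c' hr (by omega)]
    have harith : minx - 1 + ((c' : Int) + 1) = minx + c' := by omega
    push_cast
    rw [harith]

theorem foldl_max_len (g : List (List (List Char))) (w : Nat)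
    (hrows : ∀ r ∈ g, r.length = w) (hne : g ≠ []) :
    ∀ m : Nat, m ≤ w + 1 → g.foldl (fun a r => max a (r.length + 1)) m = w + 1 := by
  induction g with
  | nil => exact absurd rfl hne
  | cons r t ih =>
    intro m hm
    simp only [List.foldl_cons]
    rw [hrows r (by simp)]
    rcases eq_or_ne t [] with rfl | hte
    · simp; omega
    · exact ih (fun q hq => hrows q (by simp [hq])) hte _ (by omega)

theorem bound_add (vis : PySem.Set (Int × Int)) (minx maxx miny maxy minx' maxx' miny' maxy' : Int)
    (q : Int × Int)
    (hb : ∀ p ∈ vis, minx ≤ p.1 ∧ p.1 ≤ maxx ∧ miny ≤ p.2 ∧ p.2 ≤ maxy)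
    (hw1 : minx' ≤ minx) (hw2 : maxx ≤ maxx') (hw3 : miny' ≤ miny) (hw4 : maxy ≤ maxy')
    (hq : minx' ≤ q.1 ∧ q.1 ≤ maxx' ∧ miny' ≤ q.2 ∧ q.2 ≤ maxy') :
    ∀ p ∈ PySem.Set.add vis q, minx' ≤ p.1 ∧ p.1 ≤ maxx' ∧ miny' ≤ p.2 ∧ p.2 ≤ maxy' := by
  intro p hp
  rw [PySem.Set.mem_add] at hp
  rcases hp with hp | rfl
  · have := hb p hp
    exact ⟨by omega, by omega, by omega, by omega⟩
  · exact hq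

theorem SimInv.intro' (g : List (List (List Char))) (x y : Nat) (dir : PyDirection) (w : Nat)
    (bx by_ d minx maxx miny maxy : Int) (vis : PySem.Set (Int × Int))
    (hx : (x : Int) = bx - minx) (hy : (y : Int) = by_ - miny)
    (hx1 : minx ≤ bx) (hx2 : bx ≤ maxx) (hy1 : miny ≤ by_) (hy2 : by_ ≤ maxy)
    (hlen : (g.length : Int) = maxy - miny + 1) (hw : (w : Int) = maxx - minx + 1)
    (hrows : ∀ row ∈ g, row.length = w) (hcell : CellProp g w minx miny vis)
    (hdir : dirIdx dir = d)
    (hbound : ∀ p ∈ vis, minx ≤ p.1 ∧ p.1 ≤ maxx ∧ miny ≤ p.2 ∧ p.2 ≤ maxy) :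
    SimInv ⟨g, x, y, dir, w⟩ ⟨bx, by_, d, minx, maxx, miny, maxy, vis⟩ :=
  ⟨hx, hy, hx1, hx2, hy1, hy2, hlen, hw, hrows, hcell, hdir, hbound⟩

theorem stepF (a : AMove) (b : BState) (h : SimInv a b) :
    SimInv (aExec 'F' a) (bStep (bDelta b.d) b) := by
  obtain ⟨hx, hy, hx1, hx2, hy1, hy2, hlen, hw, hrows, hcell, hdir, hbound⟩ := h
  obtain ⟨ag, ax, ay, adir, aw⟩ := a
  simp only at hx hy hlen hw hrows hcell hdir hbound ⊢
  have hgne : ag ≠ [] := by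
    intro hg
    rw [hg] at hlen
    simp at hlen
    omega
  have hylen : ay < ag.length := by omega
  have hxw : ax < aw := by omega
  have hrowy : (ag.getD ay []).length = aw := by
    rw [List.getD_eq_getElem ag [] hylen]
    exact hrows _ (List.getElem_mem _)
  cases adir with
  | east =>
    simp only [dirIdx] at hdir
    have hδ : bDelta b.d = (1, 0) := by rw [← hdir]; rfl
    rw [hδ]
    have hB : bStep (1, 0) b = ⟨b.x + 1, b.y, b.d, min b.minx (b.x + 1), max b.maxx (b.x + 1),
        b.miny, b.maxy, PySem.Set.add b.vis (b.x + 1, b.y)⟩ := by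
      simp only [bStep, BState.mk.injEq, add_zero]
      and_intros <;> first | trivial | omega
    rw [hB]
    simp only [aExec, reduceIte]
    by_cases hgrow : (ag.getD ay []).length ≤ ax + 1
    · rw [if_pos hgrow]
      rw [hrowy] at hgrow
      have hbx : b.x = b.maxx := by omega
      rw [PySem.List.foldl_prod_mk (fun s1 row => s1 ++ [row ++ [([] : List Char)]])
        (fun s2 (row : List (List Char)) => max s2 (row ++ [([] : List Char)]).length)]
      rw [PySem.List.foldl_append_singleton_eq_map (fun row => row ++ [([] : List Char)])]
      rw [show (fun s2 (row : List (List Char)) => max s2 (row ++ [([] : List Char)]).length)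
          = (fun a r => max a (r.length + 1)) from by funext s2 row; simp]
      rw [foldl_max_len ag aw hrows hgne aw (by omega)]
      simp only [List.nil_append]
      have hrows' : ∀ r ∈ ag.map (· ++ [([] : List Char)]), r.length = aw + 1 := by
        intro r hr
        rw [List.mem_map] at hr
        obtain ⟨q, hq, rfl⟩ := hr
        simp [hrows q hq]
      have hcell' := cellProp_mark (ag.map (· ++ [([] : List Char)])) (aw + 1)
        b.minx b.miny b.vis ay (ax + 1)
        (cellProp_append_col ag aw b.minx b.miny b.vis hcell hrows
          (fun r hmem => by have := hbound _ hmem; simp only at this; omega))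
        hrows' (by simpa using hylen) (by omega)
      have hpt : ((b.minx + ((ax + 1 : Nat) : Int), b.miny + (ay : Int)) : Int × Int)
          = (b.x + 1, b.y) := by
        simp only [Prod.mk.injEq]
        constructor <;> omega
      rw [hpt] at hcell'
      have hminx : min b.minx (b.x + 1) = b.minx := by omega
      have hmaxx : max b.maxx (b.x + 1) = b.maxx + 1 := by omega
      rw [hminx, hmaxx]
      try dsimp only
      refine SimInv.intro' _ _ _ _ _ _ _ _ _ _ _ _ _
        (by omega) (by omega) (by omega) (by omega) (by omega) (by omega)
        (by rw [length_setCell, List.length_map]; omega) (by omega)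
        (rows_setCell _ _ _ _ hrows') hcell' (by simp only [dirIdx]; exact hdir)
        (bound_add b.vis b.minx b.maxx b.miny b.maxy _ _ _ _ _ hbound
          (by omega) (by omega) (by omega) (by omega) ⟨by omega, by omega, by omega, by omega⟩)
    · rw [if_neg hgrow]
      rw [hrowy] at hgrow
      have hcell' := cellProp_mark ag aw b.minx b.miny b.vis ay (ax + 1)
        hcell hrows hylen (by omega)
      have hpt : ((b.minx + ((ax + 1 : Nat) : Int), b.miny + (ay : Int)) : Int × Int)
          = (b.x + 1, b.y) := by
        simp only [Prod.mk.injEq]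
        constructor <;> omega
      rw [hpt] at hcell'
      have hminx : min b.minx (b.x + 1) = b.minx := by omega
      have hmaxx : max b.maxx (b.x + 1) = b.maxx := by omega
      rw [hminx, hmaxx]
      try dsimp only
      refine SimInv.intro' _ _ _ _ _ _ _ _ _ _ _ _ _
        (by omega) (by omega) (by omega) (by omega) (by omega) (by omega)
        (by rw [length_setCell]; omega) (by omega)
        (rows_setCell _ _ _ _ hrows) hcell' (by simp only [dirIdx]; exact hdir)
        (bound_add b.vis b.minx b.maxx b.miny b.maxy _ _ _ _ _ hbound
          (by omega) (by omega) (by omega) (by omega) ⟨by omega, by omega, by omega, by omega⟩)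
  | south =>
    simp only [dirIdx] at hdir
    have hδ : bDelta b.d = (0, 1) := by rw [← hdir]; rfl
    rw [hδ]
    have hB : bStep (0, 1) b = ⟨b.x, b.y + 1, b.d, b.minx, b.maxx,
        b.miny, max b.maxy (b.y + 1), PySem.Set.add b.vis (b.x, b.y + 1)⟩ := by
      simp only [bStep, BState.mk.injEq, add_zero]
      and_intros <;> first | trivial | omega
    rw [hB]
    simp only [aExec, reduceIte]
    by_cases hgrow : ag.length ≤ ay + 1
    · rw [if_pos hgrow]
      have hby : b.y = b.maxy := by omega
      have hmaxy : max b.maxy (b.y + 1) = b.maxy + 1 := by omega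
      rw [hmaxy]
      have hrowsApp : ∀ r ∈ ag ++ [List.replicate aw ([] : List Char)],
          r.length = aw := by
        intro r hr
        rw [List.mem_append] at hr
        rcases hr with hr | hr
        · exact hrows r hr
        · simp at hr
          simp [hr]
      have hcell' := cellProp_mark (ag ++ [List.replicate aw ([] : List Char)])
        aw b.minx b.miny b.vis (ay + 1) ax
        (cellProp_append_row ag aw b.minx b.miny b.vis hcell
          (fun c hmem => by have := hbound _ hmem; simp only at this; omega))
        hrowsApp (by simp; omega) hxw
      have hpt : ((b.minx + (ax : Int), b.miny + ((ay + 1 : Nat) : Int)) : Int × Int)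
          = (b.x, b.y + 1) := by
        simp only [Prod.mk.injEq]
        constructor <;> omega
      rw [hpt] at hcell'
      try dsimp only
      refine SimInv.intro' _ _ _ _ _ _ _ _ _ _ _ _ _
        (by omega) (by omega) (by omega) (by omega) (by omega) (by omega)
        (by rw [length_setCell]; simp; omega) (by omega)
        (rows_setCell _ _ _ _ hrowsApp) hcell' (by simp only [dirIdx]; exact hdir)
        (bound_add b.vis b.minx b.maxx b.miny b.maxy _ _ _ _ _ hbound
          (by omega) (by omega) (by omega) (by omega) ⟨by omega, by omega, by omega, by omega⟩)
    · rw [if_neg hgrow]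
      have hmaxy : max b.maxy (b.y + 1) = b.maxy := by omega
      rw [hmaxy]
      have hcell' := cellProp_mark ag aw b.minx b.miny b.vis (ay + 1) ax
        hcell hrows (by omega) hxw
      have hpt : ((b.minx + (ax : Int), b.miny + ((ay + 1 : Nat) : Int)) : Int × Int)
          = (b.x, b.y + 1) := by
        simp only [Prod.mk.injEq]
        constructor <;> omega
      rw [hpt] at hcell'
      try dsimp only
      refine SimInv.intro' _ _ _ _ _ _ _ _ _ _ _ _ _
        (by omega) (by omega) (by omega) (by omega) (by omega) (by omega)
        (by rw [length_setCell]; omega) (by omega)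
        (rows_setCell _ _ _ _ hrows) hcell' (by simp only [dirIdx]; exact hdir)
        (bound_add b.vis b.minx b.maxx b.miny b.maxy _ _ _ _ _ hbound
          (by omega) (by omega) (by omega) (by omega) ⟨by omega, by omega, by omega, by omega⟩)
  | north =>
    simp only [dirIdx] at hdir
    have hδ : bDelta b.d = (0, -1) := by rw [← hdir]; rfl
    rw [hδ]
    have hB : bStep (0, -1) b = ⟨b.x, b.y - 1, b.d, b.minx, b.maxx,
        min b.miny (b.y - 1), b.maxy, PySem.Set.add b.vis (b.x, b.y - 1)⟩ := by
      simp only [bStep, BState.mk.injEq, add_zero]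
      and_intros <;> first | trivial | omega
    rw [hB]
    simp only [aExec, reduceIte]
    by_cases hgrow : ay = 0
    · rw [if_pos hgrow]
      have hby : b.y = b.miny := by omega
      have hminy : min b.miny (b.y - 1) = b.miny - 1 := by omega
      rw [hminy]
      simp only [hgrow, ne_eq, not_true_eq_false, reduceIte]
      have hrowsCons : ∀ r ∈ List.replicate aw ([] : List Char) :: ag,
          r.length = aw := by
        intro r hr
        rw [List.mem_cons] at hr
        rcases hr with hr | hr
        · simp [hr]
        · exact hrows r hr
      have hcell' := cellProp_mark (List.replicate aw ([] : List Char) :: ag)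
        aw b.minx (b.miny - 1) b.vis 0 ax
        (cellProp_cons_row ag aw b.minx b.miny b.vis hcell
          (fun c hmem => by have := hbound _ hmem; simp only at this; omega))
        hrowsCons (by simp) hxw
      have hpt : ((b.minx + (ax : Int), b.miny - 1 + ((0 : Nat) : Int)) : Int × Int)
          = (b.x, b.y - 1) := by
        simp only [Prod.mk.injEq]
        constructor <;> omega
      rw [hpt] at hcell'
      try dsimp only
      refine SimInv.intro' _ _ _ _ _ _ _ _ _ _ _ _ _
        (by omega) (by omega) (by omega) (by omega) (by omega) (by omega)
        (by rw [length_setCell]; simp; omega) (by omega)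
        (rows_setCell _ _ _ _ hrowsCons) hcell' (by simp only [dirIdx]; exact hdir)
        (bound_add b.vis b.minx b.maxx b.miny b.maxy _ _ _ _ _ hbound
          (by omega) (by omega) (by omega) (by omega) ⟨by omega, by omega, by omega, by omega⟩)
    · rw [if_neg hgrow]
      have hminy : min b.miny (b.y - 1) = b.miny := by omega
      rw [hminy]
      rw [if_pos hgrow]
      have hcell' := cellProp_mark ag aw b.minx b.miny b.vis (ay - 1) ax
        hcell hrows (by omega) hxw
      have hpt : ((b.minx + (ax : Int), b.miny + ((ay - 1 : Nat) : Int)) : Int × Int)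
          = (b.x, b.y - 1) := by
        simp only [Prod.mk.injEq]
        constructor <;> omega
      rw [hpt] at hcell'
      try dsimp only
      refine SimInv.intro' _ _ _ _ _ _ _ _ _ _ _ _ _
        (by omega) (by omega) (by omega) (by omega) (by omega) (by omega)
        (by rw [length_setCell]; omega) (by omega)
        (rows_setCell _ _ _ _ hrows) hcell' (by simp only [dirIdx]; exact hdir)
        (bound_add b.vis b.minx b.maxx b.miny b.maxy _ _ _ _ _ hbound
          (by omega) (by omega) (by omega) (by omega) ⟨by omega, by omega, by omega, by omega⟩)
  | west =>
    simp only [dirIdx] at hdir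
    have hδ : bDelta b.d = (-1, 0) := by rw [← hdir]; rfl
    rw [hδ]
    have hB : bStep (-1, 0) b = ⟨b.x - 1, b.y, b.d, min b.minx (b.x - 1), b.maxx,
        b.miny, b.maxy, PySem.Set.add b.vis (b.x - 1, b.y)⟩ := by
      simp only [bStep, BState.mk.injEq, add_zero]
      and_intros <;> first | trivial | omega
    rw [hB]
    simp only [aExec, reduceIte]
    by_cases hgrow : ax = 0
    · rw [if_pos hgrow]
      have hbx : b.x = b.minx := by omega
      have hminx : min b.minx (b.x - 1) = b.minx - 1 := by omega
      rw [hminx]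
      simp only [hgrow, ne_eq, not_true_eq_false, reduceIte]
      rw [PySem.List.foldl_prod_mk (fun s1 row => s1 ++ [([] : List Char) :: row])
        (fun s2 (row : List (List Char)) => max s2 (([] : List Char) :: row).length)]
      rw [PySem.List.foldl_append_singleton_eq_map (fun row => ([] : List Char) :: row)]
      rw [show (fun s2 (row : List (List Char)) => max s2 (([] : List Char) :: row).length)
          = (fun a r => max a (r.length + 1)) from by funext s2 row; simp]
      rw [foldl_max_len ag aw hrows hgne aw (by omega)]
      simp only [List.nil_append]
      have hrows' : ∀ r ∈ ag.map (([] : List Char) :: ·), r.length = aw + 1 := by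
        intro r hr
        rw [List.mem_map] at hr
        obtain ⟨q, hq, rfl⟩ := hr
        simp [hrows q hq]
      have hcell' := cellProp_mark (ag.map (([] : List Char) :: ·)) (aw + 1)
        (b.minx - 1) b.miny b.vis ay 0
        (cellProp_cons_col ag aw b.minx b.miny b.vis hcell
          (fun r hmem => by have := hbound _ hmem; simp only at this; omega))
        hrows' (by simpa using hylen) (by omega)
      have hpt : ((b.minx - 1 + ((0 : Nat) : Int), b.miny + (ay : Int)) : Int × Int)
          = (b.x - 1, b.y) := by
        simp only [Prod.mk.injEq]
        constructor <;> omega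
      rw [hpt] at hcell'
      try dsimp only
      refine SimInv.intro' _ _ _ _ _ _ _ _ _ _ _ _ _
        (by omega) (by omega) (by omega) (by omega) (by omega) (by omega)
        (by rw [length_setCell, List.length_map]; omega) (by omega)
        (rows_setCell _ _ _ _ hrows') hcell' (by simp only [dirIdx]; exact hdir)
        (bound_add b.vis b.minx b.maxx b.miny b.maxy _ _ _ _ _ hbound
          (by omega) (by omega) (by omega) (by omega) ⟨by omega, by omega, by omega, by omega⟩)
    · rw [if_neg hgrow]
      have hminx : min b.minx (b.x - 1) = b.minx := by omega
      rw [hminx]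
      rw [if_pos hgrow]
      have hcell' := cellProp_mark ag aw b.minx b.miny b.vis ay (ax - 1)
        hcell hrows hylen (by omega)
      have hpt : ((b.minx + ((ax - 1 : Nat) : Int), b.miny + (ay : Int)) : Int × Int)
          = (b.x - 1, b.y) := by
        simp only [Prod.mk.injEq]
        constructor <;> omega
      rw [hpt] at hcell'
      try dsimp only
      refine SimInv.intro' _ _ _ _ _ _ _ _ _ _ _ _ _
        (by omega) (by omega) (by omega) (by omega) (by omega) (by omega)
        (by rw [length_setCell]; omega) (by omega)
        (rows_setCell _ _ _ _ hrows) hcell' (by simp only [dirIdx]; exact hdir)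
        (bound_add b.vis b.minx b.maxx b.miny b.maxy _ _ _ _ _ hbound
          (by omega) (by omega) (by omega) (by omega) ⟨by omega, by omega, by omega, by omega⟩)

theorem aExec_L (st : AMove) : aExec 'L' st = { st with dir := dirL st.dir } := by
  simp [aExec]

theorem aExec_R (st : AMove) : aExec 'R' st = { st with dir := dirR st.dir } := by
  simp [aExec]

theorem aExec_other (c : Char) (hF : c ≠ 'F') (hL : c ≠ 'L') (hR : c ≠ 'R') (st : AMove) :
    aExec c st = st := by
  simp [aExec, hF, hL, hR]

theorem aExecN_other (c : Char) (hF : c ≠ 'F') (hL : c ≠ 'L') (hR : c ≠ 'R') (k : Nat)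
    (st : AMove) : aExecN c k st = st := by
  induction k generalizing st with
  | zero => rfl
  | succ k ih => rw [aExecN, aExec_other c hF hL hR, ih]

theorem dirIdx_bounds (d : PyDirection) : 0 ≤ dirIdx d ∧ dirIdx d < 4 := by
  cases d <;> simp [dirIdx]

theorem dirIdx_dirL (d : PyDirection) :
    dirIdx (dirL d) = PySem.Int.mod (dirIdx d - 1) 4 := by
  cases d <;> decide

theorem dirIdx_dirR (d : PyDirection) :
    dirIdx (dirR d) = PySem.Int.mod (dirIdx d + 1) 4 := by
  cases d <;> decide

theorem simInv_set_d (a : AMove) (b : BState) (h : SimInv a b) (dir' : PyDirection)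
    (d' : Int) (hd : dirIdx dir' = d') :
    SimInv { a with dir := dir' } { b with d := d' } :=
  ⟨h.hx, h.hy, h.hx1, h.hx2, h.hy1, h.hy2, h.hlen, h.hw, h.hrows, h.hcell, hd, h.hbound⟩

theorem tokL (k : Nat) (a : AMove) (b : BState) (h : SimInv a b) :
    SimInv (aExecN 'L' k a) { b with d := PySem.Int.mod (b.d - k) 4 } := by
  induction k generalizing a b with
  | zero =>
    have hb := dirIdx_bounds a.dir
    rw [h.hdir] at hb
    have hd : PySem.Int.mod (b.d - 0) 4 = b.d := by
      rw [PySem.Int.mod_eq_emod_of_pos (by norm_num)]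
      omega
    simp only [Nat.cast_zero]
    rw [hd]
    exact h
  | succ k ih =>
    rw [aExecN, aExec_L]
    have h1 : SimInv { a with dir := dirL a.dir } { b with d := PySem.Int.mod (b.d - 1) 4 } :=
      simInv_set_d a b h (dirL a.dir) _ (by rw [dirIdx_dirL, h.hdir])
    have h2 := ih _ _ h1
    have hd : PySem.Int.mod (PySem.Int.mod (b.d - 1) 4 - k) 4
        = PySem.Int.mod (b.d - (k + 1 : Nat)) 4 := by
      rw [PySem.Int.mod_eq_emod_of_pos (by norm_num), PySem.Int.mod_eq_emod_of_pos (by norm_num),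
        PySem.Int.mod_eq_emod_of_pos (by norm_num)]
      push_cast
      omega
    rw [hd] at h2
    exact h2

theorem tokR (k : Nat) (a : AMove) (b : BState) (h : SimInv a b) :
    SimInv (aExecN 'R' k a) { b with d := PySem.Int.mod (b.d + k) 4 } := by
  induction k generalizing a b with
  | zero =>
    have hb := dirIdx_bounds a.dir
    rw [h.hdir] at hb
    have hd : PySem.Int.mod (b.d + 0) 4 = b.d := by
      rw [PySem.Int.mod_eq_emod_of_pos (by norm_num)]
      omega
    simp only [Nat.cast_zero]
    rw [hd]
    exact h
  | succ k ih =>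
    rw [aExecN, aExec_R]
    have h1 : SimInv { a with dir := dirR a.dir } { b with d := PySem.Int.mod (b.d + 1) 4 } :=
      simInv_set_d a b h (dirR a.dir) _ (by rw [dirIdx_dirR, h.hdir])
    have h2 := ih _ _ h1
    have hd : PySem.Int.mod (PySem.Int.mod (b.d + 1) 4 + k) 4
        = PySem.Int.mod (b.d + (k + 1 : Nat)) 4 := by
      rw [PySem.Int.mod_eq_emod_of_pos (by norm_num), PySem.Int.mod_eq_emod_of_pos (by norm_num),
        PySem.Int.mod_eq_emod_of_pos (by norm_num)]
      push_cast
      omega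
    rw [hd] at h2
    exact h2

theorem tokF (k : Nat) (a : AMove) (b : BState) (h : SimInv a b) :
    SimInv (aExecN 'F' k a) (bMoveN k (bDelta b.d) b) := by
  induction k generalizing a b with
  | zero => exact h
  | succ k ih =>
    rw [aExecN, bMoveN_succ]
    exact ih _ _ (stepF a b h)

theorem tokInv (c : Char) (cnt : Nat) (a : AMove) (b : BState) (h : SimInv a b) :
    SimInv (aExecN c cnt a) (bTok c cnt b) := by
  by_cases hF : c = 'F'
  · subst hF
    simp only [bTok, reduceIte]
    exact tokF cnt a b h
  · by_cases hL : c = 'L'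
    · subst hL
      simp only [bTok, reduceIte]
      exact tokL cnt a b h
    · by_cases hR : c = 'R'
      · subst hR
        simp only [bTok, reduceIte]
        exact tokR cnt a b h
      · rw [aExecN_other c hF hL hR]
        simp only [bTok, if_neg hF, if_neg hL, if_neg hR]
        exact h

theorem isdigit_bounds (c : Char) (h : PySem.Chars.isdigit c = true) :
    48 ≤ c.toNat ∧ c.toNat ≤ 57 := by
  simp [PySem.Chars.isdigit, Char.le_def, UInt32.le_iff_toNat_le] at h
  exact h

theorem scanDigits_spec (cs : List Char) (k : Nat) :
    scanDigits cs k = ((cs.drop k).takeWhile PySem.Chars.isdigit,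
      if k + ((cs.drop k).takeWhile PySem.Chars.isdigit).length < cs.length
      then some (k + ((cs.drop k).takeWhile PySem.Chars.isdigit).length) else none) := by
  fun_induction scanDigits cs k with
  | case1 k h hd r ih =>
    rw [List.drop_eq_getElem_cons h, List.takeWhile_cons_of_pos hd]
    simp only [List.length_cons]
    rw [show r = scanDigits cs (k + 1) from rfl, ih]
    have harith : k + (((cs.drop (k+1)).takeWhile PySem.Chars.isdigit).length + 1)
        = (k + 1) + ((cs.drop (k+1)).takeWhile PySem.Chars.isdigit).length := by omega
    rw [harith]
  | case2 k h hd =>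
    rw [List.drop_eq_getElem_cons h, List.takeWhile_cons_of_neg (by simpa using hd)]
    simp [h]
  | case3 k h =>
    rw [List.drop_of_length_le (by omega)]
    simp
    omega

theorem bScan_spec (cs : List Char) (k : Nat) :
    bScan cs k = k + ((cs.drop k).takeWhile PySem.Chars.isdigit).length := by
  fun_induction bScan cs k with
  | case1 k h ih =>
    obtain ⟨hk, hd⟩ := h
    have hd' : PySem.Chars.isdigit cs[k] = true := by
      rwa [List.getD_eq_getElem cs ' ' hk] at hd
    rw [List.drop_eq_getElem_cons hk, List.takeWhile_cons_of_pos hd', ih]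
    simp; omega
  | case2 k h =>
    rcases Nat.lt_or_ge k cs.length with hk | hk
    · have hd : ¬ PySem.Chars.isdigit cs[k] = true := by
        intro hc
        exact h ⟨hk, by rwa [List.getD_eq_getElem cs ' ' hk]⟩
      rw [List.drop_eq_getElem_cons hk, List.takeWhile_cons_of_neg (by simpa using hd)]
      simp
    · rw [List.drop_of_length_le hk]
      simp

theorem pyIntOfDigits_foldl_lt (s : List Char) (hd : ∀ c ∈ s, PySem.Chars.isdigit c = true) :
    ∀ acc : Nat, s.foldl (fun a c => a * 10 + (c.toNat - 48)) acc < (acc + 1) * 10 ^ s.length := by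
  induction s with
  | nil => intro acc; simp
  | cons c t ih =>
    intro acc
    simp only [List.foldl_cons, List.length_cons]
    have hc := isdigit_bounds c (hd c (by simp))
    have h1 : acc * 10 + (c.toNat - 48) + 1 ≤ (acc + 1) * 10 := by omega
    calc t.foldl (fun a c => a * 10 + (c.toNat - 48)) (acc * 10 + (c.toNat - 48))
        < (acc * 10 + (c.toNat - 48) + 1) * 10 ^ t.length :=
          ih (fun x hx => hd x (by simp [hx])) _
      _ ≤ ((acc + 1) * 10) * 10 ^ t.length := Nat.mul_le_mul_right _ h1
      _ = (acc + 1) * 10 ^ (t.length + 1) := by ring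

theorem pyIntOfDigits_lt (s : List Char) (hd : ∀ c ∈ s, PySem.Chars.isdigit c = true) :
    pyIntOfDigits s < 10 ^ s.length := by
  have := pyIntOfDigits_foldl_lt s hd 0
  simpa [pyIntOfDigits] using this

theorem aLoop_pending_run (cs : List Char) (c : Char) (amt : Nat) (e : Option Nat) :
    ∀ (m fuel : Nat) (st : AMove) (i : Nat), i < cs.length → m + 1 ≤ fuel →
    aLoop cs fuel st (some ⟨c, amt, m, e⟩) i =
      aLoop cs (fuel - (m + 1)) (aExecN c m st) none (e.getD (cs.length - 1)) := by
  intro m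
  induction m with
  | zero =>
    intro fuel st i hi hf
    obtain ⟨f, rfl⟩ : ∃ f, fuel = f + 1 := ⟨fuel - 1, by omega⟩
    rw [aLoop, if_pos hi]
    simp [aExecN]
  | succ m ih =>
    intro fuel st i hi hf
    obtain ⟨f, rfl⟩ : ∃ f, fuel = f + 1 := ⟨fuel - 1, by omega⟩
    rw [aLoop, if_pos hi]
    simp only [Nat.succ_ne_zero, if_false]
    rw [show (⟨c, amt, m + 1, e⟩ : APending).left - 1 = m from rfl]
    have hrun := ih f (aExec c st) i hi (by omega)
    have harith : f - (m + 1) = f + 1 - (m + 1 + 1) := by omega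
    rw [hrun, harith, show aExecN c m (aExec c st) = aExecN c (m + 1) st from rfl]

theorem aLoop_exit (cs : List Char) (fuel : Nat) (st : AMove) (p : Option APending) (i : Nat)
    (hi : ¬ i < cs.length) : aLoop cs fuel st p i = st := by
  cases fuel with
  | zero => rfl
  | succ f =>
    rw [aLoop.eq_def]
    dsimp only
    rw [if_neg hi]

theorem bLoop_exit (cs : List Char) (i : Nat) (st : BState) (hi : ¬ i < cs.length) :
    bLoop cs i st = st := by
  rw [bLoop, dif_neg hi]

theorem isdigit_not_cmd (c : Char) (h : PySem.Chars.isdigit c = true) :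
    c ≠ 'F' ∧ c ≠ 'L' ∧ c ≠ 'R' := by
  refine ⟨?_, ?_, ?_⟩ <;> rintro rfl <;> exact absurd h (by decide)

theorem mainInv (cs : List Char) :
    ∀ (K i : Nat) (a : AMove) (b : BState) (fuel : Nat), cs.length - i ≤ K → SimInv a b →
    (cs.length - i) * (10 ^ cs.length + 4) + 1 ≤ fuel →
    SimInv (aLoop cs fuel a none i) (bLoop cs i b) := by
  intro K
  have hX : 1 ≤ 10 ^ cs.length + 4 := by
    have := Nat.zero_le (10 ^ cs.length)
    omega
  induction K with
  | zero =>
    intro i a b fuel hK h hf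
    have hi : ¬ i < cs.length := by omega
    rw [aLoop_exit cs fuel a none i hi, bLoop_exit cs i b hi]
    exact h
  | succ K ih =>
    intro i a b fuel hK h hf
    by_cases hi : i < cs.length
    · obtain ⟨f, rfl⟩ : ∃ f, fuel = f + 1 := ⟨fuel - 1, by omega⟩
      -- B side: one unfolding of the token loop
      rw [bLoop, dif_pos hi]
      have hscan := bScan_spec cs (i + 1)
      obtain ⟨tw, htw⟩ : ∃ tw, tw = (cs.drop (i + 1)).takeWhile PySem.Chars.isdigit := ⟨_, rfl⟩
      rw [← htw] at hscan
      have hLle : tw.length ≤ cs.length - (i + 1) := by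
        have h1 := (List.takeWhile_prefix (p := PySem.Chars.isdigit) (l := cs.drop (i + 1))).length_le
        rw [List.length_drop] at h1
        rw [htw]
        exact h1
      rw [aLoop.eq_def]
      dsimp only
      rw [if_pos hi]
      by_cases hdig : (i < cs.length - 1) ∧ (PySem.Chars.isdigit (cs.getD (i + 1) ' ') = true)
      · -- token with a repeat count
        rw [if_pos hdig]
        have hL1 : 1 ≤ tw.length := by
          have hd2 : PySem.Chars.isdigit (cs[i + 1]'(by omega)) = true := by
            have h2 := hdig.2
            rwa [List.getD_eq_getElem cs ' ' (by omega)] at h2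
          rw [htw, List.drop_eq_getElem_cons (by omega), List.takeWhile_cons_of_pos hd2]
          simp
        have htwdig : ∀ x ∈ tw, PySem.Chars.isdigit x = true := by
          intro x hx
          rw [htw] at hx
          exact List.mem_takeWhile_imp hx
        have hamt : pyIntOfDigits tw < 10 ^ cs.length := by
          calc pyIntOfDigits tw < 10 ^ tw.length := pyIntOfDigits_lt tw htwdig
            _ ≤ 10 ^ cs.length := Nat.pow_le_pow_right (by omega) (by omega)
        rw [scanDigits_spec cs (i + 1)]
        dsimp only
        rw [← htw]
        -- the slice in B is the digit run
        have hslice : PySem.List.slice cs (some ((i + 1 : Nat) : Int)) (some ((bScan cs (i + 1) : Nat) : Int))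
            = tw := by
          rw [PySem.List.slice_natCast, hscan, htw]
          rw [show i + 1 + ((cs.drop (i + 1)).takeWhile PySem.Chars.isdigit).length - (i + 1)
              = ((cs.drop (i + 1)).takeWhile PySem.Chars.isdigit).length from by omega]
          exact ((List.prefix_iff_eq_take.mp (List.takeWhile_prefix _)).symm)
        rw [hscan] at hslice ⊢
        rw [if_pos (show i + 1 < i + 1 + tw.length from by omega), hslice]
        -- A side: run the pending command amt times
        rw [aLoop_pending_run cs (cs.getD i ' ') (pyIntOfDigits tw) _ (pyIntOfDigits tw) f a i hi
          (by
            rw [show cs.length - i = (cs.length - (i + 1 + tw.length)) + (tw.length + 1) from by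
              omega, Nat.add_mul] at hf
            have hLX : 10 ^ cs.length + 4 ≤ (tw.length + 1) * (10 ^ cs.length + 4) :=
              Nat.le_mul_of_pos_left _ (by omega)
            omega)]
        have hinv := tokInv (cs.getD i ' ') (pyIntOfDigits tw) a b h
        by_cases hjl : i + 1 + tw.length < cs.length
        · rw [if_pos hjl]
          dsimp only [Option.getD_some]
          have := ih (i + 1 + tw.length) _ _ (f - (pyIntOfDigits tw + 1)) (by omega) hinv (by
            rw [show cs.length - i = (cs.length - (i + 1 + tw.length)) + (tw.length + 1) from by
              omega, Nat.add_mul] at hf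
            have hLX : 10 ^ cs.length + 4 ≤ (tw.length + 1) * (10 ^ cs.length + 4) :=
              Nat.le_mul_of_pos_left _ (by omega)
            omega)
          exact this
        · rw [if_neg hjl]
          dsimp only [Option.getD_none]
          -- the digits run to the end of the code: A's loop revisits the final digit, a no-op
          have hlen1 : i + 1 + tw.length = cs.length := by omega
          have htweq : tw = cs.drop (i + 1) := by
            rw [htw]
            refine (List.takeWhile_prefix _).eq_of_length ?_
            rw [List.length_drop]
            rw [htw] at hlen1
            omega
          have hlastdig : PySem.Chars.isdigit (cs.getD (cs.length - 1) ' ') = true := by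
            have hmem : cs[cs.length - 1]'(by omega) ∈ cs.drop (i + 1) := by
              have : (cs.drop (i + 1))[cs.length - 1 - (i + 1)]'(by
                  rw [List.length_drop]; omega) = cs[cs.length - 1]'(by omega) := by
                rw [List.getElem_drop]
                congr 1
                omega
              rw [← this]
              exact List.getElem_mem _
            rw [List.getD_eq_getElem cs ' ' (by omega)]
            rw [← htweq] at hmem
            exact htwdig _ hmem
          obtain ⟨hF, hL, hR⟩ := isdigit_not_cmd _ hlastdig
          obtain ⟨f2, hf2⟩ : ∃ f2, f - (pyIntOfDigits tw + 1) = f2 + 1 := by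
            refine ⟨f - (pyIntOfDigits tw + 1) - 1, ?_⟩
            rw [show cs.length - i = (cs.length - i - 2) + 2 from by omega, Nat.add_mul] at hf
            omega
          rw [hf2, aLoop, if_pos (by omega)]
          rw [if_neg (by omega)]
          rw [aExec_other _ hF hL hR]
          rw [show cs.length - 1 + 1 = cs.length from by omega]
          rw [aLoop_exit cs f2 _ none cs.length (by omega)]
          rw [bLoop_exit cs (i + 1 + tw.length) _ (by omega)]
          exact hinv
      · -- single command, no repeat count
        rw [if_neg hdig]
        have hL0 : tw.length = 0 := by
          rcases Nat.lt_or_ge (i + 1) cs.length with h1 | h1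
          · have hnd : ¬ PySem.Chars.isdigit (cs.getD (i + 1) ' ') = true := fun hc =>
              hdig ⟨by omega, hc⟩
            rw [htw, List.drop_eq_getElem_cons h1, List.takeWhile_cons_of_neg (by
              rwa [List.getD_eq_getElem cs ' ' h1] at hnd)]
            rfl
          · rw [htw, List.drop_of_length_le h1]
            rfl
        rw [hscan, hL0]
        rw [if_neg (show ¬ (i + 1 < i + 1 + 0) from by omega)]
        have hinv := tokInv (cs.getD i ' ') 1 a b h
        rw [show aExecN (cs.getD i ' ') 1 a = aExec (cs.getD i ' ') a from rfl] at hinv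
        have := ih (i + 1) _ _ f (by omega) hinv (by
          rw [show cs.length - i = (cs.length - (i + 1)) + 1 from by omega, Nat.add_mul] at hf
          omega)
        rw [show i + 1 + 0 = i + 1 from by omega]
        exact this
    · rw [aLoop_exit cs fuel a none i hi, bLoop_exit cs i b hi]
      exact h

theorem renderRow_eq (row : List (List Char)) :
    renderRow row = row.map (fun cell => if cell = ['*'] then '*' else ' ') := by
  unfold renderRow
  have hfun : (fun (acc : List Char) (cell : List Char) =>
      acc ++ (if cell = ['*'] then ['*'] else [' ']))
      = (fun acc cell => acc ++ [if cell = ['*'] then '*' else ' ']) := by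
    funext acc cell
    rw [apply_ite (fun c => [c])]
  rw [hfun, PySem.List.foldl_append_singleton_eq_map]
  simp

theorem join_nil_map (l : List Int) (g : Int → Char) :
    PySem.Chars.join [] (l.map (fun xx => [g xx])) = l.map g := by
  rw [show l.map (fun xx => [g xx]) = (l.map g).map (fun c => [c]) by rw [List.map_map]; rfl]
  exact PySem.Chars.join_nil_singletons _

theorem render_eq (a : AMove) (b : BState) (h : SimInv a b) :
    PySem.Chars.join ['\r', '\n'] (a.grid.map renderRow) =
    PySem.Chars.join ['\r', '\n']
      ((PySem.List.pyRange b.miny (b.maxy + 1) 1).map (fun yy =>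
        PySem.Chars.join []
          ((PySem.List.pyRange b.minx (b.maxx + 1) 1).map (fun xx =>
            if PySem.Set.contains b.vis (xx, yy) then ['*'] else [' '])))) := by
  obtain ⟨hx, hy, hx1, hx2, hy1, hy2, hlen, hw, hrows, hcell, hdir, hbound⟩ := h
  apply congrArg
  apply List.ext_getElem
  · rw [List.length_map, List.length_map, PySem.List.length_pyRange_one]
    omega
  intro r h1 h2
  rw [List.length_map] at h1
  rw [List.getElem_map, List.getElem_map, PySem.List.getElem_pyRange_one]
  have hyy : ∀ xx, (if PySem.Set.contains b.vis (xx, b.miny + (r : Int)) then (['*'] : List Char) else [' '])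
      = [if PySem.Set.contains b.vis (xx, b.miny + (r : Int)) then '*' else ' '] := by
    intro xx; rw [apply_ite (fun c => [c])]
  simp only [hyy]
  rw [join_nil_map, renderRow_eq]
  apply List.ext_getElem
  · have := hrows a.grid[r] (a.grid.getElem_mem h1)
    simp [PySem.List.length_pyRange_one]
    omega
  intro c hc1 hc2
  rw [List.length_map] at hc1
  rw [List.getElem_map, List.getElem_map, PySem.List.getElem_pyRange_one]
  have hcw : c < a.maxWidth := by
    have := hrows a.grid[r] (a.grid.getElem_mem h1)
    omega
  have hc := hcell r c h1 hcw
  rw [List.getD_eq_getElem a.grid [] h1, List.getD_eq_getElem a.grid[r] [] (by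
    rw [hrows a.grid[r] (a.grid.getElem_mem h1)]; exact hcw)] at hc
  by_cases hmem : (b.minx + (c : Int), b.miny + (r : Int)) ∈ b.vis
  · rw [if_pos (hc.mpr hmem), if_pos ((PySem.Set.contains_iff b.vis _).mpr hmem)]
  · rw [if_neg (fun hstar => hmem (hc.mp hstar)),
      if_neg (fun hcont => hmem ((PySem.Set.contains_iff b.vis _).mp hcont))]

theorem initInv : SimInv { grid := [[['*']]], x := 0, y := 0, dir := .east, maxWidth := 1 }
    { x := 0, y := 0, d := 0, minx := 0, maxx := 0, miny := 0, maxy := 0,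
      vis := PySem.Set.ofList [((0:Int), (0:Int))] } := by
  refine ⟨by simp, by simp, by simp, by simp, by simp, by simp, by simp, by simp, ?_, ?_, by decide, ?_⟩
  · intro row hr
    simp only [List.mem_singleton] at hr
    subst hr; rfl
  · intro r c hr hc
    change r < 1 at hr
    change c < 1 at hc
    have hr0 : r = 0 := by omega
    have hc0 : c = 0 := by omega
    subst hr0; subst hc0
    simp [PySem.Set.mem_ofList]
  · intro p hp
    rw [PySem.Set.mem_ofList, List.mem_singleton] at hp
    subst hp; norm_num

-- ===== VERDICT (by name: the statement is the Claim_ definition above) =====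
theorem execute_spec : Claim_equal_execute := by
  intro code _
  unfold Spec_execute
  show execute code = execute_alt code
  unfold execute execute_alt
  have hfuel : (code.toList.length - 0) * (10 ^ code.toList.length + 4) + 1 ≤
      (code.toList.length + 1) * (10 ^ code.toList.length + 4) := by
    rw [Nat.succ_mul, Nat.sub_zero]
    have h2 : 1 ≤ 10 ^ code.toList.length + 4 := by
      have := Nat.zero_le (10 ^ code.toList.length); omega
    omega
  have h := mainInv code.toList code.toList.length 0 _ _ _ (le_refl _) initInv hfuel
  exact congrArg String.ofList (render_eq _ _ h)
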